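-- pv_equiv track=rewrite | github.com/projectdx75/gommi_downloader_manager | downloader/ytdlp_aria2.py | _vtt_to_srt
-- ===== SOURCE A (Python) =====
-- def _vtt_to_srt(vtt_content: str) -> str:
--     """VTT 형식을 SRT 형식으로 간단히 변환"""
--     if not vtt_content.startswith("WEBVTT"):
--         return vtt_content
--
--     lines = vtt_content.split("\n")
--     srt_lines = []
--     cue_index = 1
--     i = 0
--     while i < len(lines):
--         line = lines[i].strip()
--         if line.startswith("WEBVTT") or line.startswith("NOTE") or line.startswith("STYLE"):
--             i += 1
--             continue
--         if not line:
--             i += 1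
--             continue
--         if "-->" in line:
--             # VTT 타임코드를 SRT 형식으로 변환 (. -> ,)
--             srt_timecode = line.replace(".", ",")
--             srt_lines.append(str(cue_index))
--             srt_lines.append(srt_timecode)
--             cue_index += 1
--             i += 1
--             while i < len(lines) and lines[i].strip():
--                 srt_lines.append(lines[i].rstrip())
--                 i += 1
--             srt_lines.append("")
--         else:
--             i += 1
--     return "\n".join(srt_lines)
-- ===== SOURCE B (Python) =====
-- def _find_cue(block):
--     for k, l in enumerate(block):
--         s = l.strip()
--         if "-->" in s and not s.startswith(("WEBVTT", "NOTE", "STYLE")):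
--             return l, block[k + 1:]
--     return None
--
--
-- def _vtt_to_srt(vtt_content: str) -> str:
--     """VTT 형식을 SRT 형식으로 간단히 변환"""
--     if not vtt_content.startswith("WEBVTT"):
--         return vtt_content
--
--     blocks = []
--     cur = []
--     for l in vtt_content.split("\n"):
--         if l.strip():
--             cur.append(l)
--         else:
--             if cur:
--                 blocks.append(cur)
--             cur = []
--     if cur:
--         blocks.append(cur)
--
--     out = []
--     idx = 1
--     for b in blocks:
--         hit = _find_cue(b)
--         if hit is None:
--             continue
--         timecode, rest = hit
--         out.append(str(idx))
--         out.append(timecode.strip().replace(".", ","))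
--         for l in rest:
--             out.append(l.rstrip())
--         out.append("")
--         idx += 1
--     return "\n".join(out)
-- ===== Notes on version B (the rewrite author's own statement) =====
-- stated objective: alternative
-- what changed: Replaces A's single index-driven while loop (with a nested text-consuming inner while) by a two-phase decomposition: first partition the lines into blank-separated blocks, then render each block by locating its first timecode line.
import Mathlib
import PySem

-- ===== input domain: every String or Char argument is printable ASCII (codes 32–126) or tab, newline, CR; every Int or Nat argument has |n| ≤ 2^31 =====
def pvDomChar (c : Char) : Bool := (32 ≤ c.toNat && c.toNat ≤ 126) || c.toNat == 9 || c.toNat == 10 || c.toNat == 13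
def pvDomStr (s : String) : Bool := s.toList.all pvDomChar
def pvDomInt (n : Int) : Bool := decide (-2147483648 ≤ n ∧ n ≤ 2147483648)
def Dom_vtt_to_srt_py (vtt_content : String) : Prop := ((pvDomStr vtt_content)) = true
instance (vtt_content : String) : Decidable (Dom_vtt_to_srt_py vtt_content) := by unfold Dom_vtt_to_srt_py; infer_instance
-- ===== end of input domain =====

-- B replaces A's index-driven while loop (with its nested text-consuming while) by a
-- two-phase decomposition: partition the lines into blank-separated blocks, then render
-- each block that contains a timecode line.  Objective: alternative decomposition, same cost.

-- shared tiny helper: Python `line.startswith(("WEBVTT", "NOTE", "STYLE"))` on a stripped line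
def pvSkipLine (line : String) : Bool :=
  PySem.Str.startswith line "WEBVTT" || PySem.Str.startswith line "NOTE" ||
    PySem.Str.startswith line "STYLE"

-- ===== PORT A =====

-- A's inner while: consume lines while their strip is non-empty, appending rstrip
def pvInnerA : List String → List String × List String
  | [] => ([], [])
  | l :: rest =>
    if PySem.Str.strip l ≠ "" then
      ((PySem.Str.rstrip l) :: (pvInnerA rest).1, (pvInnerA rest).2)
    else ([], l :: rest)

lemma pvInnerA_len : ∀ xs : List String, (pvInnerA xs).2.length ≤ xs.length := by
  intro xs
  induction xs with
  | nil => simp [pvInnerA]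
  | cons l rest ih =>
    simp only [pvInnerA]
    split
    · exact Nat.le_succ_of_le ih
    · simp

-- A's outer while loop over the remaining lines, carrying cue_index
def pvOuterA : List String → Int → List String
  | [], _ => []
  | l :: rest, cue =>
    let line := PySem.Str.strip l
    if pvSkipLine line then pvOuterA rest cue
    else if line = "" then pvOuterA rest cue
    else if PySem.Str.isIn "-->" line then
      PySem.Int.toStr cue :: PySem.Str.replace line "." "," ::
        ((pvInnerA rest).1 ++ [""] ++ pvOuterA (pvInnerA rest).2 (cue + 1))
    else pvOuterA rest cue
termination_by lines _ => lines.length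
decreasing_by
  · simp
  · simp
  · exact Nat.lt_succ_of_le (pvInnerA_len rest)
  · simp

def vtt_to_srt_py (vtt_content : String) : String :=
  if !PySem.Str.startswith vtt_content "WEBVTT" then vtt_content
  else PySem.Str.join "\n" (pvOuterA ((PySem.Str.split? vtt_content "\n").getD []) 1)

-- ===== PORT B =====

-- B's block-building loop: state (blocks so far, current run of non-blank lines)
def pvStep (st : List (List String) × List String) (l : String) :
    List (List String) × List String :=
  if PySem.Str.strip l ≠ "" then (st.1, st.2 ++ [l])
  else if st.2 ≠ [] then (st.1 ++ [st.2], [])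
  else (st.1, [])

def pvBlocks (lines : List String) : List (List String) :=
  let p := lines.foldl pvStep ([], [])
  if p.2 ≠ [] then p.1 ++ [p.2] else p.1

-- B's _find_cue: first line of the block that is a timecode, with the lines after it
def pvFindCue : List String → Option (String × List String)
  | [] => none
  | l :: rest =>
    if PySem.Str.isIn "-->" (PySem.Str.strip l) && !pvSkipLine (PySem.Str.strip l) then
      some (l, rest)
    else pvFindCue rest

-- B's output loop over the blocks, carrying idx
def pvRender : List (List String) → Int → List String
  | [], _ => []
  | b :: bs, idx =>
    match pvFindCue b with
    | none => pvRender bs idx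
    | some (t, rest) =>
      PySem.Int.toStr idx :: PySem.Str.replace (PySem.Str.strip t) "." "," ::
        (rest.map PySem.Str.rstrip ++ [""] ++ pvRender bs (idx + 1))

def vtt_to_srt_py_alt (vtt_content : String) : String :=
  if !PySem.Str.startswith vtt_content "WEBVTT" then vtt_content
  else PySem.Str.join "\n" (pvRender (pvBlocks ((PySem.Str.split? vtt_content "\n").getD [])) 1)

-- ===== PRECONDITION & SPEC =====
def Spec_vtt_to_srt_py (vtt_content : String) (out : String) : Prop := out = vtt_to_srt_py_alt vtt_content
instance (vtt_content : String) (out : String) : Decidable (Spec_vtt_to_srt_py vtt_content out) := by unfold Spec_vtt_to_srt_py; infer_instance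

-- ===== CLAIM (what is proved, stated in full; the proofs are below) =====
def Claim_equal_vtt_to_srt_py : Prop := ∀ (vtt_content : String), Dom_vtt_to_srt_py vtt_content → Spec_vtt_to_srt_py vtt_content (vtt_to_srt_py vtt_content)

-- ===== LEMMAS AND PROOFS =====

-- proof-only view of the block structure: span of non-blank lines, and a recursive blocks fn
def pvBlk : List String → List String × List String
  | [] => ([], [])
  | l :: rest =>
    if PySem.Str.strip l = "" then ([], l :: rest)
    else (l :: (pvBlk rest).1, (pvBlk rest).2)

lemma pvBlk_len : ∀ xs : List String, (pvBlk xs).2.length ≤ xs.length := by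
  intro xs
  induction xs with
  | nil => simp [pvBlk]
  | cons l rest ih =>
    simp only [pvBlk]
    split
    · simp
    · exact Nat.le_succ_of_le ih

def pvBlocksR : List String → List (List String)
  | [] => []
  | l :: rest =>
    if PySem.Str.strip l = "" then pvBlocksR rest
    else (l :: (pvBlk rest).1) :: pvBlocksR (pvBlk rest).2
termination_by lines => lines.length
decreasing_by
  · simp
  · exact Nat.lt_succ_of_le (pvBlk_len rest)

lemma pvInnerA_eq (xs : List String) :
    pvInnerA xs = ((pvBlk xs).1.map PySem.Str.rstrip, (pvBlk xs).2) := by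
  induction xs with
  | nil => simp [pvInnerA, pvBlk]
  | cons l rest ih =>
    simp only [pvInnerA, pvBlk]
    by_cases h : PySem.Str.strip l = ""
    · simp [h]
    · simp [h, ih]

lemma pvRender_nil_block (bs : List (List String)) (idx : Int) :
    pvRender ([] :: bs) idx = pvRender bs idx := by
  simp [pvRender, pvFindCue]

lemma pvFindCue_cons (l : String) (b : List String)
    (h : (PySem.Str.isIn "-->" (PySem.Str.strip l) && !pvSkipLine (PySem.Str.strip l)) = false) :
    pvFindCue (l :: b) = pvFindCue b := by
  simp only [pvFindCue, h, Bool.false_eq_true, if_false]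

lemma pvRender_skip (l : String) (b : List String) (bs : List (List String)) (idx : Int)
    (h : (PySem.Str.isIn "-->" (PySem.Str.strip l) && !pvSkipLine (PySem.Str.strip l)) = false) :
    pvRender ((l :: b) :: bs) idx = pvRender (b :: bs) idx := by
  simp only [pvRender, pvFindCue_cons l b h]

lemma pvRender_blk (rest : List String) (idx : Int) :
    pvRender ((pvBlk rest).1 :: pvBlocksR (pvBlk rest).2) idx
      = pvRender (pvBlocksR rest) idx := by
  cases rest with
  | nil => simp [pvBlk, pvBlocksR, pvRender_nil_block]
  | cons r rest' =>
    by_cases h : PySem.Str.strip r = ""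
    · simp [pvBlk, pvBlocksR, h, pvRender_nil_block]
    · simp [pvBlk, pvBlocksR, h]

lemma pvSkip_of_blank : pvSkipLine "" = false := by decide

lemma pvMain : ∀ (n : Nat) (lines : List String), lines.length ≤ n → ∀ cue : Int,
    pvOuterA lines cue = pvRender (pvBlocksR lines) cue := by
  intro n
  induction n with
  | zero =>
    intro lines h cue
    have : lines = [] := List.eq_nil_of_length_eq_zero (Nat.le_zero.mp h)
    simp [this, pvOuterA, pvBlocksR, pvRender]
  | succ n ih =>
    intro lines h cue
    cases lines with
    | nil => simp [pvOuterA, pvBlocksR, pvRender]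
    | cons l rest =>
      have hr : rest.length ≤ n := Nat.lt_succ_iff.mp h
      by_cases hb : PySem.Str.strip l = ""
      · -- blank line: A skips it (skip-prefix test is false on ""), B's blocks drop it
        have hs : pvSkipLine (PySem.Str.strip l) = false := by rw [hb]; exact pvSkip_of_blank
        simp only [pvOuterA, hb]
        simp only [pvBlocksR, hb, if_true]
        exact ih rest hr cue
      · simp only [pvBlocksR, hb, if_false]
        by_cases hs : pvSkipLine (PySem.Str.strip l) = true
        · -- WEBVTT/NOTE/STYLE line: A skips; B's find_cue rejects it
          simp only [pvOuterA, hs, if_true]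
          rw [pvRender_skip l (pvBlk rest).1 (pvBlocksR (pvBlk rest).2) cue
                (by rw [hs]; simp), pvRender_blk rest cue]
          exact ih rest hr cue
        · have hs' : pvSkipLine (PySem.Str.strip l) = false := by
            revert hs; cases pvSkipLine (PySem.Str.strip l) <;> simp
          by_cases ha : PySem.Str.isIn "-->" (PySem.Str.strip l) = true
          · -- timecode line: both emit the cue, the following non-blank lines, and ""
            simp only [pvOuterA, hs', hb, ha, if_false, if_true, Bool.false_eq_true,
              pvRender, pvFindCue, ha, hs', Bool.not_false, Bool.and_true]
            rw [pvInnerA_eq]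
            have := ih (pvBlk rest).2 (Nat.le_trans (pvBlk_len rest) hr) (cue + 1)
            simp [this]
          · -- ordinary non-timecode line between cues: A skips; B's find_cue rejects it
            have ha' : PySem.Str.isIn "-->" (PySem.Str.strip l) = false := by
              revert ha; cases PySem.Str.isIn "-->" (PySem.Str.strip l) <;> simp
            simp only [pvOuterA, hs', ha', hb, if_false, Bool.false_eq_true]
            rw [pvRender_skip l (pvBlk rest).1 (pvBlocksR (pvBlk rest).2) cue
                  (by rw [ha']; simp), pvRender_blk rest cue]
            exact ih rest hr cue

lemma pvBlocks_invariant : ∀ (lines : List String) (bs : List (List String)) (cur : List String),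
    (let p := lines.foldl pvStep (bs, cur);
     if p.2 ≠ [] then p.1 ++ [p.2] else p.1)
      = if cur = [] then bs ++ pvBlocksR lines
        else bs ++ ((cur ++ (pvBlk lines).1) :: pvBlocksR (pvBlk lines).2) := by
  intro lines
  induction lines with
  | nil =>
    intro bs cur
    by_cases h : cur = [] <;> simp [pvBlocksR, pvBlk, h]
  | cons l rest ih =>
    intro bs cur
    by_cases hb : PySem.Str.strip l = ""
    · -- blank: flush cur
      simp only [List.foldl_cons, pvStep, hb, ne_eq, not_true_eq_false, if_false,
        not_false_eq_true]
      by_cases hc : cur = []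
      · simp only [hc, ne_eq, not_true_eq_false, if_false]
        have := ih bs []
        simp only [if_pos rfl] at this
        simp [this, hc, pvBlocksR, hb]
      · simp only [if_pos hc] at *
        simp only [hc, if_neg hc, ne_eq]
        have := ih (bs ++ [cur]) []
        simp only [if_pos rfl] at this
        simp [hc, this, pvBlk, pvBlocksR, hb, List.append_assoc]
    · -- non-blank: extend cur
      simp only [List.foldl_cons, pvStep, hb, ne_eq, not_false_eq_true, if_true]
      have := ih bs (cur ++ [l])
      have hne : cur ++ [l] ≠ [] := by simp
      simp only [if_neg hne, ne_eq, ite_not] at this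
      by_cases hc : cur = []
      · subst hc
        simp only [List.nil_append] at this
        simpa [pvBlk, pvBlocksR, hb] using this
      · simp [hc, this, pvBlk, pvBlocksR, hb, List.append_assoc]

lemma pvBlocks_eq (lines : List String) : pvBlocks lines = pvBlocksR lines := by
  have := pvBlocks_invariant lines [] []
  simpa [pvBlocks] using this

-- ===== VERDICT (by name: the statement is the Claim_ definition above) =====
theorem vtt_to_srt_py_spec : Claim_equal_vtt_to_srt_py := by
  intro vtt_content _
  unfold Spec_vtt_to_srt_py vtt_to_srt_py vtt_to_srt_py_alt
  split
  · rfl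
  · rw [pvBlocks_eq, pvMain ((PySem.Str.split? vtt_content "\n").getD []).length _ (le_refl _) 1]
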